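-- pv_equiv track=rewrite | github.com/smirnovevgeny/TopicModelingFintech | tools.py | getIntersectionDict
-- ===== SOURCE A (Python) =====
-- def getIntersectionDict(dict1, dict2):
--     keys_intersections = set(dict1.keys()) & set(dict2.keys())
--
--     dict_intersection = dict()
--     for key in keys_intersections:
--         if key in dict1:
--             value1 = dict1[key]
--         else:
--             continue
--         if key in dict2:
--             value2 = dict2[key]
--         else:
--             continue
--         dict_intersection[key] = min(value1, value2)
--
--     return dict_intersection
-- ===== SOURCE B (Python) =====
-- def getIntersectionDict(dict1, dict2):
--     # stage 1: keep dict1's value for every key that dict2 also has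
--     result = {}
--     for key, value in dict1.items():
--         if key in dict2:
--             result[key] = value
--     # stage 2: sweep dict2 and lower any stored value it beats
--     for key, value in dict2.items():
--         if key in result and value < result[key]:
--             result[key] = value
--     return result
-- ===== Notes on version B (the rewrite author's own statement) =====
-- stated objective: alternative
-- what changed: Replaces A's precomputed set-intersection and single min-building loop by two staged passes over the inputs: the first copies dict1's value for every key dict2 also has, the second sweeps dict2 and conditionally lowers any stored value it beats, so min() is never called and the minimum emerges from the overwrite sweep.
import Mathlib
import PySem

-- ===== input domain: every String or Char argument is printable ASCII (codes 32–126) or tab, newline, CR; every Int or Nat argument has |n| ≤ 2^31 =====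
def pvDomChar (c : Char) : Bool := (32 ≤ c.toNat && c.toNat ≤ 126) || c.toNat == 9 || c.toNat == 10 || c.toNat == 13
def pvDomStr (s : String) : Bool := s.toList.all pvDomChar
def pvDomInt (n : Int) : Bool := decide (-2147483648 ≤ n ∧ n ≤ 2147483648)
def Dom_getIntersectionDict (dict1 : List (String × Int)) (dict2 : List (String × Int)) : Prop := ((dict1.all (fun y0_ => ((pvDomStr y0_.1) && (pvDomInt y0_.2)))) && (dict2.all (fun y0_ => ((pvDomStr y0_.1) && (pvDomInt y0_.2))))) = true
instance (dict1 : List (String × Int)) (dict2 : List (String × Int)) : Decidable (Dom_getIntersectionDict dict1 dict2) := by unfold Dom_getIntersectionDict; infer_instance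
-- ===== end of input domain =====

-- B replaces A's set-intersection-then-min loop by two staged passes (copy common
-- entries from dict1, then a clamping sweep over dict2); return values are proved equal.

-- ===== PORT A =====
def getIntersectionDict (dict1 : List (String × Int)) (dict2 : List (String × Int)) : List (String × Int) :=
  let keysIntersections : PySem.Set String :=
    PySem.Set.inter (PySem.Set.ofList (PySem.Dict.keys (PySem.Dict.mk dict1)))
                    (PySem.Set.ofList (PySem.Dict.keys (PySem.Dict.mk dict2)))
  (keysIntersections.foldl
      (fun acc key =>
        match PySem.Dict.get? (PySem.Dict.mk dict1) key with
        | none => acc                       -- 'else: continue'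
        | some value1 =>
          match PySem.Dict.get? (PySem.Dict.mk dict2) key with
          | none => acc                     -- 'else: continue'
          | some value2 => PySem.Dict.insert acc key (min value1 value2))
      PySem.Dict.empty).items

-- ===== PORT B =====
def getIntersectionDict_alt (dict1 : List (String × Int)) (dict2 : List (String × Int)) : List (String × Int) :=
  -- stage 1: keep dict1's value for every key that dict2 also has
  let result := dict1.foldl
    (fun acc kv =>
      if PySem.Dict.contains (PySem.Dict.mk dict2) kv.1
      then PySem.Dict.insert acc kv.1 kv.2 else acc)
    PySem.Dict.empty
  -- stage 2: sweep dict2 and lower any stored value it beats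
  (dict2.foldl
    (fun acc kv =>
      match PySem.Dict.get? acc kv.1 with
      | some cur => if kv.2 < cur then PySem.Dict.insert acc kv.1 kv.2 else acc
      | none => acc)
    result).items

-- ===== PRECONDITION & SPEC =====
-- Pre_ excludes an association list that repeats a key: such a list does not encode any
-- Python dict (both arguments are dicts in A), so neither program's reading of it is specified.
def Pre_getIntersectionDict (dict1 : List (String × Int)) (dict2 : List (String × Int)) : Prop :=
  (dict1.map Prod.fst).Nodup ∧ (dict2.map Prod.fst).Nodup
instance (dict1 : List (String × Int)) (dict2 : List (String × Int)) : Decidable (Pre_getIntersectionDict dict1 dict2) := by unfold Pre_getIntersectionDict; infer_instance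
def pvWitness_getIntersectionDict : (List (String × Int)) × (List (String × Int)) :=
  ([("a", 3), ("b", 5)], [("b", 2), ("c", 7)])
def Spec_getIntersectionDict (dict1 : List (String × Int)) (dict2 : List (String × Int)) (out : List (String × Int)) : Prop := out = getIntersectionDict_alt dict1 dict2
instance (dict1 : List (String × Int)) (dict2 : List (String × Int)) (out : List (String × Int)) : Decidable (Spec_getIntersectionDict dict1 dict2 out) := by unfold Spec_getIntersectionDict; infer_instance

-- ===== CLAIM (what is proved, stated in full; the proofs are below) =====
def Claim_equal_getIntersectionDict : Prop := ∀ (dict1 : List (String × Int)) (dict2 : List (String × Int)), Dom_getIntersectionDict dict1 dict2 → Pre_getIntersectionDict dict1 dict2 → Spec_getIntersectionDict dict1 dict2 (getIntersectionDict dict1 dict2)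

-- ===== LEMMAS AND PROOFS =====

-- A's filter predicate (membership in set(dict2.keys())) holds exactly where dict2's lookup succeeds.
theorem gid_pred_iff (dict2 : List (String × Int)) (x : String) :
    (PySem.Set.contains (PySem.Set.ofList (PySem.Dict.keys (PySem.Dict.mk dict2))) x = true)
      ↔ (PySem.Dict.get? (PySem.Dict.mk dict2) x).isSome = true := by
  rw [PySem.Set.contains_iff, PySem.Set.mem_ofList, Option.isSome_iff_ne_none,
      ne_eq, PySem.Dict.get?_eq_none_iff_not_mem_keys, not_not]

-- A's fold over the filtered key list of dict1 equals a single min-inserting fold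
-- over dict1's items, for any accumulator, provided dict1's keys are distinct.
theorem gid_aux (dict2 : List (String × Int)) (d1 : List (String × Int))
    (hnd : (d1.map Prod.fst).Nodup) (acc : PySem.Dict String Int) :
    ((d1.map Prod.fst).filter
        (fun x => PySem.Set.contains (PySem.Set.ofList (PySem.Dict.keys (PySem.Dict.mk dict2))) x)).foldl
      (fun acc key =>
        match PySem.Dict.get? (PySem.Dict.mk d1) key with
        | none => acc
        | some value1 =>
          match PySem.Dict.get? (PySem.Dict.mk dict2) key with
          | none => acc
          | some value2 => PySem.Dict.insert acc key (min value1 value2))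
      acc
    = d1.foldl
      (fun acc kv =>
        match PySem.Dict.get? (PySem.Dict.mk dict2) kv.1 with
        | some value2 => PySem.Dict.insert acc kv.1 (min kv.2 value2)
        | none => acc)
      acc := by
  induction d1 generalizing acc with
  | nil => simp
  | cons kv t ih =>
    obtain ⟨k, v⟩ := kv
    simp only [List.map_cons, List.nodup_cons] at hnd
    obtain ⟨hk_notin, hnd_t⟩ := hnd
    have htail : ∀ (acc' : PySem.Dict String Int),
        ((t.map Prod.fst).filter
            (fun x => PySem.Set.contains (PySem.Set.ofList (PySem.Dict.keys (PySem.Dict.mk dict2))) x)).foldl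
          (fun acc key =>
            match PySem.Dict.get? (PySem.Dict.mk ((k, v) :: t)) key with
            | none => acc
            | some value1 =>
              match PySem.Dict.get? (PySem.Dict.mk dict2) key with
              | none => acc
              | some value2 => PySem.Dict.insert acc key (min value1 value2))
          acc'
        = t.foldl
          (fun acc kv =>
            match PySem.Dict.get? (PySem.Dict.mk dict2) kv.1 with
            | some value2 => PySem.Dict.insert acc kv.1 (min kv.2 value2)
            | none => acc)
          acc' := by
      intro acc'
      rw [PySem.List.foldl_congr_mem _ _
            (fun acc key =>
              match PySem.Dict.get? (PySem.Dict.mk t) key with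
              | none => acc
              | some value1 =>
                match PySem.Dict.get? (PySem.Dict.mk dict2) key with
                | none => acc
                | some value2 => PySem.Dict.insert acc key (min value1 value2)) acc'
            (by
              intro a x hx
              have hxt : x ∈ t.map Prod.fst := (List.mem_filter.mp hx).1
              have hne : (k == x) = false := by
                simpa using fun h : k = x => hk_notin (h ▸ hxt)
              rw [PySem.Dict.get?_mk_cons, hne]
              simp)]
      exact ih hnd_t acc'
    by_cases hp : PySem.Set.contains (PySem.Set.ofList (PySem.Dict.keys (PySem.Dict.mk dict2))) k = true
    · obtain ⟨v2, hv2⟩ := Option.isSome_iff_exists.mp ((gid_pred_iff dict2 k).mp hp)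
      simp only [List.map_cons, List.filter_cons, hp, if_true, List.foldl_cons]
      have hinit :
          (match PySem.Dict.get? (PySem.Dict.mk ((k, v) :: t)) k with
            | none => acc
            | some value1 =>
              match PySem.Dict.get? (PySem.Dict.mk dict2) k with
              | none => acc
              | some value2 => PySem.Dict.insert acc k (min value1 value2))
          = PySem.Dict.insert acc k (min v v2) := by
        rw [PySem.Dict.get?_mk_cons]
        simp [hv2]
      rw [hinit]
      simp only [hv2]
      exact htail _
    · have hnone : PySem.Dict.get? (PySem.Dict.mk dict2) k = none := by
        by_contra h
        exact hp ((gid_pred_iff dict2 k).mpr (Option.isSome_iff_ne_none.mpr h))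
      simp only [List.map_cons, List.filter_cons, hp, List.foldl_cons]
      have hinit :
          (match PySem.Dict.get? (PySem.Dict.mk dict2) (k, v).1 with
            | some value2 => PySem.Dict.insert acc (k, v).1 (min (k, v).2 value2)
            | none => acc) = acc := by rw [hnone]
      rw [hinit]
      exact htail acc

-- The min-inserting fold over distinct fresh keys appends its hits to the accumulator's items.
theorem gid_itemsA (dict2 : List (String × Int)) (d1 : List (String × Int))
    (hnd : (d1.map Prod.fst).Nodup) (acc : PySem.Dict String Int)
    (hfresh : ∀ kv ∈ d1, acc.contains kv.1 = false) :
    (d1.foldl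
      (fun acc kv =>
        match PySem.Dict.get? (PySem.Dict.mk dict2) kv.1 with
        | some value2 => PySem.Dict.insert acc kv.1 (min kv.2 value2)
        | none => acc)
      acc).items
    = acc.items ++ d1.filterMap
        (fun kv => (PySem.Dict.get? (PySem.Dict.mk dict2) kv.1).map (fun v2 => (kv.1, min kv.2 v2))) := by
  induction d1 generalizing acc with
  | nil => simp
  | cons kv t ih =>
    obtain ⟨k, v⟩ := kv
    simp only [List.map_cons, List.nodup_cons] at hnd
    obtain ⟨hk_notin, hnd_t⟩ := hnd
    cases h2 : PySem.Dict.get? (PySem.Dict.mk dict2) k with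
    | none =>
      simp only [List.foldl_cons, List.filterMap_cons, h2, Option.map_none]
      exact ih hnd_t acc (fun kv hkv => hfresh kv (List.mem_cons_of_mem _ hkv))
    | some v2 =>
      simp only [List.foldl_cons, List.filterMap_cons, h2, Option.map_some]
      have hc : acc.contains k = false := hfresh (k, v) (List.mem_cons_self)
      have hfresh' : ∀ kv ∈ t, (PySem.Dict.insert acc k (min v v2)).contains kv.1 = false := by
        intro kv hkv
        rw [PySem.Dict.contains_insert]
        have hne : (kv.1 == k) = false := by
          simpa using fun h : kv.1 = k => hk_notin (h ▸ List.mem_map_of_mem hkv)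
        rw [hne, hfresh kv (List.mem_cons_of_mem _ hkv)]
        rfl
      rw [ih hnd_t _ hfresh', PySem.Dict.items_insert_of_not_contains _ _ hc]
      simp

-- Stage 1 of B: the conditional-copy fold over distinct fresh keys appends the filtered items.
theorem gid_itemsB1 (dict2 : List (String × Int)) (d1 : List (String × Int))
    (hnd : (d1.map Prod.fst).Nodup) (acc : PySem.Dict String Int)
    (hfresh : ∀ kv ∈ d1, acc.contains kv.1 = false) :
    (d1.foldl
      (fun acc kv =>
        if PySem.Dict.contains (PySem.Dict.mk dict2) kv.1
        then PySem.Dict.insert acc kv.1 kv.2 else acc)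
      acc).items
    = acc.items ++ d1.filter (fun kv => PySem.Dict.contains (PySem.Dict.mk dict2) kv.1) := by
  induction d1 generalizing acc with
  | nil => simp
  | cons kv t ih =>
    obtain ⟨k, v⟩ := kv
    simp only [List.map_cons, List.nodup_cons] at hnd
    obtain ⟨hk_notin, hnd_t⟩ := hnd
    by_cases h2 : PySem.Dict.contains (PySem.Dict.mk dict2) k = true
    · simp only [List.foldl_cons, List.filter_cons, h2, if_true]
      have hc : acc.contains k = false := hfresh (k, v) (List.mem_cons_self)
      have hfresh' : ∀ kv ∈ t, (PySem.Dict.insert acc k v).contains kv.1 = false := by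
        intro kv hkv
        rw [PySem.Dict.contains_insert]
        have hne : (kv.1 == k) = false := by
          simpa using fun h : kv.1 = k => hk_notin (h ▸ List.mem_map_of_mem hkv)
        rw [hne, hfresh kv (List.mem_cons_of_mem _ hkv)]
        rfl
      rw [ih hnd_t _ hfresh', PySem.Dict.items_insert_of_not_contains _ _ hc]
      simp
    · simp only [Bool.not_eq_true] at h2
      simp only [List.foldl_cons, List.filter_cons, h2]
      exact ih hnd_t acc (fun kv hkv => hfresh kv (List.mem_cons_of_mem _ hkv))

-- Stage 2 of B: one clamping step rewrites the accumulator's items pointwise at the swept key.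
theorem gid_step (acc : PySem.Dict String Int) (hnd : (acc.items.map Prod.fst).Nodup)
    (k : String) (v2 : Int) :
    (match PySem.Dict.get? acc k with
      | some cur => if v2 < cur then PySem.Dict.insert acc k v2 else acc
      | none => acc).items
    = acc.items.map (fun kv => if kv.1 = k then (kv.1, min kv.2 v2) else kv) := by
  have hkeys : acc.keys.Nodup := hnd
  cases hg : PySem.Dict.get? acc k with
  | none =>
    have hid : ∀ kv ∈ acc.items, (if kv.1 = k then (kv.1, min kv.2 v2) else kv) = kv := by
      intro kv hkv
      have hne : kv.1 ≠ k := by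
        intro h
        have := PySem.Dict.get?_of_mem_items acc (show (k, kv.2) ∈ acc.items from h ▸ hkv) hkeys
        rw [hg] at this; simp at this
      simp [hne]
    simp only []
    rw [List.map_congr_left hid]
    simp
  | some cur =>
    have hval : ∀ kv ∈ acc.items, kv.1 = k → kv.2 = cur := by
      intro kv hkv hk
      have := PySem.Dict.get?_of_mem_items acc (show (k, kv.2) ∈ acc.items from hk ▸ hkv) hkeys
      rw [hg] at this; exact (Option.some.injEq _ _).mp this.symm
    by_cases hlt : v2 < cur
    · have hcont : acc.contains k = true := by
        rw [PySem.Dict.contains_eq_isSome_get?, hg]; rfl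
      simp only [hlt, if_true]
      rw [PySem.Dict.items_insert_of_contains _ _ hcont]
      apply List.map_congr_left
      intro kv hkv
      by_cases hk : kv.1 = k
      · have hbeq : (kv.1 == k) = true := by simpa using hk
        have hv : kv.2 = cur := hval kv hkv hk
        rw [if_pos hbeq, if_pos hk, hk, hv, min_eq_right (le_of_lt hlt)]
      · simp [hk, show (kv.1 == k) = false by simpa using hk]
    · simp only [hlt, if_false]
      have hid : ∀ kv ∈ acc.items, (if kv.1 = k then (kv.1, min kv.2 v2) else kv) = kv := by
        intro kv hkv
        by_cases hk : kv.1 = k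
        · have hv : kv.2 = cur := hval kv hkv hk
          have hmin : min kv.2 v2 = kv.2 := by rw [hv]; exact min_eq_left (le_of_not_gt hlt)
          rw [if_pos hk, hmin]
        · simp [hk]
      rw [List.map_congr_left hid]
      simp

-- Stage 2 of B: the whole sweep over dict2 (distinct keys) maps each stored value to its clamp.
theorem gid_itemsB2 (l : List (String × Int)) (hnd : (l.map Prod.fst).Nodup)
    (acc : PySem.Dict String Int) (hka : (acc.items.map Prod.fst).Nodup) :
    (l.foldl
      (fun acc kv =>
        match PySem.Dict.get? acc kv.1 with
        | some cur => if kv.2 < cur then PySem.Dict.insert acc kv.1 kv.2 else acc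
        | none => acc)
      acc).items
    = acc.items.map (fun kv =>
        match PySem.Dict.get? (PySem.Dict.mk l) kv.1 with
        | some v2 => (kv.1, min kv.2 v2)
        | none => kv) := by
  induction l generalizing acc with
  | nil =>
    simp only [List.foldl_nil]
    have : ∀ kv ∈ acc.items,
        (match PySem.Dict.get? (PySem.Dict.mk ([] : List (String × Int))) kv.1 with
          | some v2 => (kv.1, min kv.2 v2)
          | none => kv) = kv := by
      intro kv _; rfl
    rw [List.map_congr_left this]
    simp
  | cons kv2 t ih =>
    obtain ⟨k, v2⟩ := kv2
    simp only [List.map_cons, List.nodup_cons] at hnd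
    obtain ⟨hk_notin, hnd_t⟩ := hnd
    simp only [List.foldl_cons]
    set acc' := (match PySem.Dict.get? acc k with
      | some cur => if v2 < cur then PySem.Dict.insert acc k v2 else acc
      | none => acc) with hacc'
    have hitems' : acc'.items = acc.items.map (fun kv => if kv.1 = k then (kv.1, min kv.2 v2) else kv) :=
      gid_step acc hka k v2
    have hka' : (acc'.items.map Prod.fst).Nodup := by
      rw [hitems', List.map_map]
      have : (Prod.fst ∘ fun kv : String × Int => if kv.1 = k then (kv.1, min kv.2 v2) else kv)
          = Prod.fst := by
        funext kv; by_cases hk : kv.1 = k <;> simp [hk]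
      rw [this]; exact hka
    rw [ih hnd_t acc' hka', hitems', List.map_map]
    apply List.map_congr_left
    intro kv _
    by_cases hk : kv.1 = k
    · have hnone : PySem.Dict.get? (PySem.Dict.mk t) k = none := by
        rw [PySem.Dict.get?_eq_none_iff_not_mem_keys]
        simpa using hk_notin
      simp only [Function.comp_apply, hk, if_true, PySem.Dict.get?_mk_cons, BEq.rfl]
      simp [hnone]
    · have hne : (k == kv.1) = false := by simpa using fun h : k = kv.1 => hk h.symm
      simp only [Function.comp_apply, hk, if_false, PySem.Dict.get?_mk_cons, hne]
      rfl

-- The filterMap A produces is the filter-then-clamp list B produces.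
theorem gid_bridge (dict2 : List (String × Int)) (d1 : List (String × Int)) :
    d1.filterMap
        (fun kv => (PySem.Dict.get? (PySem.Dict.mk dict2) kv.1).map (fun v2 => (kv.1, min kv.2 v2)))
    = (d1.filter (fun kv => PySem.Dict.contains (PySem.Dict.mk dict2) kv.1)).map
        (fun kv =>
          match PySem.Dict.get? (PySem.Dict.mk dict2) kv.1 with
          | some v2 => (kv.1, min kv.2 v2)
          | none => kv) := by
  induction d1 with
  | nil => rfl
  | cons kv t ih =>
    cases hg : PySem.Dict.get? (PySem.Dict.mk dict2) kv.1 with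
    | none =>
      have hc : PySem.Dict.contains (PySem.Dict.mk dict2) kv.1 = false := by
        rw [PySem.Dict.contains_eq_isSome_get?, hg]; rfl
      simp only [List.filterMap_cons, List.filter_cons, hg, hc, Option.map_none]
      exact ih
    | some v2 =>
      have hc : PySem.Dict.contains (PySem.Dict.mk dict2) kv.1 = true := by
        rw [PySem.Dict.contains_eq_isSome_get?, hg]; rfl
      simp only [List.filterMap_cons, List.filter_cons, hg, hc, Option.map_some, if_true,
        List.map_cons]
      rw [ih]

-- ===== VERDICT (by name: the statement is the Claim_ definition above) =====
theorem getIntersectionDict_spec : Claim_equal_getIntersectionDict := by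
  intro dict1 dict2 _hdom hpre
  obtain ⟨hnd1, hnd2⟩ := hpre
  -- zeta-reduced statement of 'A's items = B's items' (defeq to the Spec_ goal)
  show ((PySem.Set.inter (PySem.Set.ofList (PySem.Dict.keys (PySem.Dict.mk dict1)))
            (PySem.Set.ofList (PySem.Dict.keys (PySem.Dict.mk dict2)))).foldl
        (fun acc key =>
          match PySem.Dict.get? (PySem.Dict.mk dict1) key with
          | none => acc
          | some value1 =>
            match PySem.Dict.get? (PySem.Dict.mk dict2) key with
            | none => acc
            | some value2 => PySem.Dict.insert acc key (min value1 value2))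
        PySem.Dict.empty).items
      = (dict2.foldl
          (fun acc kv =>
            match PySem.Dict.get? acc kv.1 with
            | some cur => if kv.2 < cur then PySem.Dict.insert acc kv.1 kv.2 else acc
            | none => acc)
          (dict1.foldl
            (fun acc kv =>
              if PySem.Dict.contains (PySem.Dict.mk dict2) kv.1
              then PySem.Dict.insert acc kv.1 kv.2 else acc)
            PySem.Dict.empty)).items
  have hempty : (PySem.Dict.empty : PySem.Dict String Int).items = [] := rfl
  have hB1 := gid_itemsB1 dict2 dict1 hnd1 PySem.Dict.empty
      (fun kv _ => PySem.Dict.contains_empty kv.1)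
  rw [hempty, List.nil_append] at hB1
  have hfilterNodup :
      (((dict1.filter (fun kv => PySem.Dict.contains (PySem.Dict.mk dict2) kv.1)).map Prod.fst)).Nodup :=
    hnd1.sublist (List.Sublist.map Prod.fst List.filter_sublist)
  have hkeys1 : PySem.Dict.keys (PySem.Dict.mk dict1) = dict1.map Prod.fst := rfl
  rw [hkeys1, PySem.Set.ofList_eq_self_of_nodup _ hnd1]
  have hinter : PySem.Set.inter (dict1.map Prod.fst)
        (PySem.Set.ofList (PySem.Dict.keys (PySem.Dict.mk dict2)))
      = (dict1.map Prod.fst).filter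
          (fun x => PySem.Set.contains (PySem.Set.ofList (PySem.Dict.keys (PySem.Dict.mk dict2))) x) := rfl
  rw [hinter, gid_aux dict2 dict1 hnd1 PySem.Dict.empty,
      gid_itemsA dict2 dict1 hnd1 PySem.Dict.empty (fun kv _ => PySem.Dict.contains_empty kv.1),
      hempty, List.nil_append,
      gid_itemsB2 dict2 hnd2 _ (by rw [hB1]; exact hfilterNodup), hB1]
  exact gid_bridge dict2 dict1
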